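-- pv_equiv track=rewrite | github.com/bemorchestrator/SimplyExpanding | keywords/utils.py | identify_serp_csv_type
-- ===== SOURCE A (Python) =====
-- def identify_serp_csv_type(headers):
--     """
--     Identify the type of CSV file based on its headers for SERP analysis.
--     """
--     # Normalize headers by stripping whitespace and converting to lowercase
--     normalized_headers = [header.strip().lower() for header in headers]
--
--     # Columns required to identify SERP Analysis CSV
--     serp_analysis_columns = {
--         'position': ['position'],
--         'serp_features': ['position serp features', 'serp features'],
--         'previous_position': ['previous position'],
--         'url': ['url'],
--         'title': ['title'],
--         'total_traffic': ['total traffic'],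
--         'total_traffic_cost': ['total traffic cost'],
--         'keywords_total': ['keywords total'],
--         'dt': ['dt'],
--         'pt': ['pt'],
--         'backlinks': ['backlinks'],
--         'referring_domains': ['referring domains']
--     }
--
--     # Helper function to check if all required columns exist
--     def has_columns(required_columns):
--         for key, possible_names in required_columns.items():
--             if not any(possible_name.lower() in normalized_headers for possible_name in possible_names):
--                 return False
--         return True
--
--     # Check if the CSV matches the SERP analysis format
--     if has_columns(serp_analysis_columns):
--         return 'serp_analysis'
--
--     # Return 'unknown' if the file type does not match the SERP analysis format
--     return 'unknown'
-- ===== SOURCE B (Python) =====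
-- # Bit index for each recognized column name; the two serp-features
-- # alternatives share one bit, so either satisfies that group.
-- _COLUMN_BIT = {
--     'position': 1 << 0,
--     'position serp features': 1 << 1,
--     'serp features': 1 << 1,
--     'previous position': 1 << 2,
--     'url': 1 << 3,
--     'title': 1 << 4,
--     'total traffic': 1 << 5,
--     'total traffic cost': 1 << 6,
--     'keywords total': 1 << 7,
--     'dt': 1 << 8,
--     'pt': 1 << 9,
--     'backlinks': 1 << 10,
--     'referring domains': 1 << 11,
-- }
--
-- _ALL_BITS = 0xFFF  # all 12 requirement groups satisfied
--
--
-- def identify_serp_csv_type(headers):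
--     """
--     Identify the type of CSV file based on its headers for SERP analysis.
--     """
--     mask = 0
--     for header in headers:
--         mask |= _COLUMN_BIT.get(header.strip().lower(), 0)
--     return 'serp_analysis' if mask == _ALL_BITS else 'unknown'
-- ===== Notes on version B (the rewrite author's own statement) =====
-- stated objective: alternative
-- what changed: Instead of looping over the requirement groups and scanning the header list for each (spec-driven nested loop), B makes one data-driven pass over the headers, OR-ing a per-name bit from a name-to-bit table into a 12-bit mask and comparing the mask to 0xFFF.
import Mathlib
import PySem

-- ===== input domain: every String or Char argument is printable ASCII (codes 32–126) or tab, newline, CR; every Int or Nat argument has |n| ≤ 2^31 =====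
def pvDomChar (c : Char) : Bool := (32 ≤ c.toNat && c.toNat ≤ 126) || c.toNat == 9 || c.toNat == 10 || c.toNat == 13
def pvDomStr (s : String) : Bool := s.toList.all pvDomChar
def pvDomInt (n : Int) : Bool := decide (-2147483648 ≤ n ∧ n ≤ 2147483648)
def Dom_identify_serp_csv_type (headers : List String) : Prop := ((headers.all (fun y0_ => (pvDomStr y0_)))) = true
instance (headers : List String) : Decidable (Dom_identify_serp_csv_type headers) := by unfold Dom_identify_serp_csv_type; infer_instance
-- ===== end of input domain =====

-- B replaces A's spec-driven nested loop (for each requirement group, scan the header list)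
-- by one data-driven pass over the headers, OR-ing a per-name bit from a name→bit table into
-- a 12-bit mask and comparing the mask to 0xFFF (alternative decomposition; return value only).

-- ===== PORT A =====
def pvSerpAnalysisColumns : List (String × List String) :=
  [("position", ["position"]),
   ("serp_features", ["position serp features", "serp features"]),
   ("previous_position", ["previous position"]),
   ("url", ["url"]),
   ("title", ["title"]),
   ("total_traffic", ["total traffic"]),
   ("total_traffic_cost", ["total traffic cost"]),
   ("keywords_total", ["keywords total"]),
   ("dt", ["dt"]),
   ("pt", ["pt"]),
   ("backlinks", ["backlinks"]),
   ("referring_domains", ["referring domains"])]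
-- the inner 'has_columns' helper: first required column with no matching possible name gives False
def pvHasColumns (normalized : List String) : List (String × List String) → Bool
  | [] => true
  | (_, possibleNames) :: rest =>
    if ! possibleNames.any (fun pn => normalized.contains (PySem.Str.lower pn)) then false
    else pvHasColumns normalized rest
def identify_serp_csv_type (headers : List String) : String :=
  let normalized_headers := headers.map (fun h => PySem.Str.lower (PySem.Str.strip h))
  if pvHasColumns normalized_headers pvSerpAnalysisColumns then "serp_analysis"
  else "unknown"

-- ===== PORT B =====
-- the _COLUMN_BIT dict of Source B (the two serp-features alternatives share bit 1)
def pvColumnBit : PySem.Dict String Nat :=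
  PySem.Dict.mk
    [("position", 1),
     ("position serp features", 2),
     ("serp features", 2),
     ("previous position", 4),
     ("url", 8),
     ("title", 16),
     ("total traffic", 32),
     ("total traffic cost", 64),
     ("keywords total", 128),
     ("dt", 256),
     ("pt", 512),
     ("backlinks", 1024),
     ("referring domains", 2048)]
def identify_serp_csv_type_alt (headers : List String) : String :=
  let mask := headers.foldl
    (fun m header => m ||| PySem.Dict.getD pvColumnBit (PySem.Str.lower (PySem.Str.strip header)) 0) 0
  if mask = 4095 then "serp_analysis" else "unknown"

-- ===== PRECONDITION & SPEC =====
def Spec_identify_serp_csv_type (headers : List String) (out : String) : Prop := out = identify_serp_csv_type_alt headers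
instance (headers : List String) (out : String) : Decidable (Spec_identify_serp_csv_type headers out) := by unfold Spec_identify_serp_csv_type; infer_instance

-- ===== CLAIM (what is proved, stated in full; the proofs are below) =====
def Claim_equal_identify_serp_csv_type : Prop := ∀ (headers : List String), Dom_identify_serp_csv_type headers → Spec_identify_serp_csv_type headers (identify_serp_csv_type headers)

-- ===== LEMMAS AND PROOFS =====

-- if-guard of has_columns as a conjunction
theorem ite_not_false (c r : Bool) : (if !c then false else r) = (c && r) := by
  cases c <;> simp

theorem any_or {α : Type} (l : List α) (f g : α → Bool) :
    l.any (fun x => f x || g x) = (l.any f || l.any g) := by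
  induction l with
  | nil => simp
  | cons x xs ih =>
    simp only [List.any_cons, ih]
    ac_rfl

theorem any_const_and {α : Type} (l : List α) (c : Bool) (f : α → Bool) :
    l.any (fun x => c && f x) = (c && l.any f) := by
  cases c <;> simp

theorem any_beq (l : List String) (a : String) : l.any (fun x => a == x) = l.contains a :=
  List.any_beq

-- the lookup table as an explicit if-chain (values written as powers of two)
set_option maxHeartbeats 1000000 in
theorem getD_val (h : String) : PySem.Dict.getD pvColumnBit h 0 =
    (if "position" = h then 1 else
     if "position serp features" = h then 2 else
     if "serp features" = h then 2 else
     if "previous position" = h then 4 else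
     if "url" = h then 8 else
     if "title" = h then 16 else
     if "total traffic" = h then 32 else
     if "total traffic cost" = h then 64 else
     if "keywords total" = h then 128 else
     if "dt" = h then 256 else
     if "pt" = h then 512 else
     if "backlinks" = h then 1024 else
     if "referring domains" = h then 2048 else 0) := by
  have hnil : (PySem.Dict.mk ([] : List (String × Nat))).get? h = none := by
    simp [PySem.Dict.get?]
  simp only [pvColumnBit, PySem.Dict.getD_eq_get?_getD, PySem.Dict.get?_mk_cons, hnil, beq_iff_eq,
    apply_ite (fun o : Option Nat => o.getD 0), Option.getD_some, Option.getD_none]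

-- which header names set bit i
set_option maxHeartbeats 1600000 in
theorem bit_of (h : String) (i : Nat) :
    (PySem.Dict.getD pvColumnBit h 0).testBit i
      = ((decide (i = 0) && ("position" == h))
      || (decide (i = 1) && ("position serp features" == h || "serp features" == h))
      || (decide (i = 2) && ("previous position" == h))
      || (decide (i = 3) && ("url" == h))
      || (decide (i = 4) && ("title" == h))
      || (decide (i = 5) && ("total traffic" == h))
      || (decide (i = 6) && ("total traffic cost" == h))
      || (decide (i = 7) && ("keywords total" == h))
      || (decide (i = 8) && ("dt" == h))
      || (decide (i = 9) && ("pt" == h))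
      || (decide (i = 10) && ("backlinks" == h))
      || (decide (i = 11) && ("referring domains" == h))) := by
  have tb0 : ∀ j : Nat, (1 : Nat).testBit j = decide (j = 0) := fun j => by
    rw [show (1 : Nat) = 2 ^ 0 by norm_num, Nat.testBit_two_pow]
    exact decide_eq_decide.mpr eq_comm
  have tb1 : ∀ j : Nat, (2 : Nat).testBit j = decide (j = 1) := fun j => by
    rw [show (2 : Nat) = 2 ^ 1 by norm_num, Nat.testBit_two_pow]
    exact decide_eq_decide.mpr eq_comm
  have tb2 : ∀ j : Nat, (4 : Nat).testBit j = decide (j = 2) := fun j => by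
    rw [show (4 : Nat) = 2 ^ 2 by norm_num, Nat.testBit_two_pow]
    exact decide_eq_decide.mpr eq_comm
  have tb3 : ∀ j : Nat, (8 : Nat).testBit j = decide (j = 3) := fun j => by
    rw [show (8 : Nat) = 2 ^ 3 by norm_num, Nat.testBit_two_pow]
    exact decide_eq_decide.mpr eq_comm
  have tb4 : ∀ j : Nat, (16 : Nat).testBit j = decide (j = 4) := fun j => by
    rw [show (16 : Nat) = 2 ^ 4 by norm_num, Nat.testBit_two_pow]
    exact decide_eq_decide.mpr eq_comm
  have tb5 : ∀ j : Nat, (32 : Nat).testBit j = decide (j = 5) := fun j => by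
    rw [show (32 : Nat) = 2 ^ 5 by norm_num, Nat.testBit_two_pow]
    exact decide_eq_decide.mpr eq_comm
  have tb6 : ∀ j : Nat, (64 : Nat).testBit j = decide (j = 6) := fun j => by
    rw [show (64 : Nat) = 2 ^ 6 by norm_num, Nat.testBit_two_pow]
    exact decide_eq_decide.mpr eq_comm
  have tb7 : ∀ j : Nat, (128 : Nat).testBit j = decide (j = 7) := fun j => by
    rw [show (128 : Nat) = 2 ^ 7 by norm_num, Nat.testBit_two_pow]
    exact decide_eq_decide.mpr eq_comm
  have tb8 : ∀ j : Nat, (256 : Nat).testBit j = decide (j = 8) := fun j => by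
    rw [show (256 : Nat) = 2 ^ 8 by norm_num, Nat.testBit_two_pow]
    exact decide_eq_decide.mpr eq_comm
  have tb9 : ∀ j : Nat, (512 : Nat).testBit j = decide (j = 9) := fun j => by
    rw [show (512 : Nat) = 2 ^ 9 by norm_num, Nat.testBit_two_pow]
    exact decide_eq_decide.mpr eq_comm
  have tb10 : ∀ j : Nat, (1024 : Nat).testBit j = decide (j = 10) := fun j => by
    rw [show (1024 : Nat) = 2 ^ 10 by norm_num, Nat.testBit_two_pow]
    exact decide_eq_decide.mpr eq_comm
  have tb11 : ∀ j : Nat, (2048 : Nat).testBit j = decide (j = 11) := fun j => by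
    rw [show (2048 : Nat) = 2 ^ 11 by norm_num, Nat.testBit_two_pow]
    exact decide_eq_decide.mpr eq_comm
  rw [getD_val]
  split_ifs <;> subst_vars <;>
    simp_all [tb0, tb1, tb2, tb3, tb4, tb5, tb6, tb7, tb8, tb9, tb10, tb11,
      Nat.zero_testBit, beq_iff_eq]

-- bit i of the OR-fold is set iff some element contributes it
theorem testBit_foldl_or (l : List String) (a i : Nat) :
    ((l.foldl (fun m h => m ||| PySem.Dict.getD pvColumnBit h 0) a).testBit i)
      = (a.testBit i || l.any (fun h => (PySem.Dict.getD pvColumnBit h 0).testBit i)) := by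
  induction l generalizing a with
  | nil => simp
  | cons x xs ih => simp [List.foldl_cons, ih, Nat.testBit_or, Bool.or_assoc]

-- over the whole list: which requirement groups the header list satisfies at bit i
theorem key_any (ns : List String) (i : Nat) :
    (ns.any (fun h => (PySem.Dict.getD pvColumnBit h 0).testBit i))
      = ((decide (i = 0) && ns.contains "position")
      || (decide (i = 1) && (ns.contains "position serp features" || ns.contains "serp features"))
      || (decide (i = 2) && ns.contains "previous position")
      || (decide (i = 3) && ns.contains "url")
      || (decide (i = 4) && ns.contains "title")
      || (decide (i = 5) && ns.contains "total traffic")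
      || (decide (i = 6) && ns.contains "total traffic cost")
      || (decide (i = 7) && ns.contains "keywords total")
      || (decide (i = 8) && ns.contains "dt")
      || (decide (i = 9) && ns.contains "pt")
      || (decide (i = 10) && ns.contains "backlinks")
      || (decide (i = 11) && ns.contains "referring domains")) := by
  simp only [bit_of, any_or, any_const_and, any_beq]

-- A's has_columns as the 12 membership conditions
theorem hasColumns_eq (ns : List String) :
    pvHasColumns ns pvSerpAnalysisColumns
      = (ns.contains "position"
        && (ns.contains "position serp features" || ns.contains "serp features")
        && ns.contains "previous position" && ns.contains "url" && ns.contains "title"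
        && ns.contains "total traffic" && ns.contains "total traffic cost"
        && ns.contains "keywords total" && ns.contains "dt" && ns.contains "pt"
        && ns.contains "backlinks" && ns.contains "referring domains") := by
  have l0 : PySem.Str.lower "position" = "position" := by decide
  have l1 : PySem.Str.lower "position serp features" = "position serp features" := by decide
  have l2 : PySem.Str.lower "serp features" = "serp features" := by decide
  have l3 : PySem.Str.lower "previous position" = "previous position" := by decide
  have l4 : PySem.Str.lower "url" = "url" := by decide
  have l5 : PySem.Str.lower "title" = "title" := by decide
  have l6 : PySem.Str.lower "total traffic" = "total traffic" := by decide
  have l7 : PySem.Str.lower "total traffic cost" = "total traffic cost" := by decide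
  have l8 : PySem.Str.lower "keywords total" = "keywords total" := by decide
  have l9 : PySem.Str.lower "dt" = "dt" := by decide
  have l10 : PySem.Str.lower "pt" = "pt" := by decide
  have l11 : PySem.Str.lower "backlinks" = "backlinks" := by decide
  have l12 : PySem.Str.lower "referring domains" = "referring domains" := by decide
  simp only [pvHasColumns, pvSerpAnalysisColumns, l0, l1, l2, l3, l4, l5, l6, l7, l8, l9, l10,
    l11, l12, List.any_cons, List.any_nil, Bool.or_false, ite_not_false, Bool.and_true]
  ac_rfl

-- the mask equals 0xFFF iff every requirement group has a matching normalized header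
theorem mask_iff (ns : List String) :
    ((ns.foldl (fun m h => m ||| PySem.Dict.getD pvColumnBit h 0) 0) = 4095)
      = (pvHasColumns ns pvSerpAnalysisColumns = true) := by
  rw [hasColumns_eq]
  apply propext
  constructor
  · intro hm
    have hv : ∀ i : Nat,
        ns.any (fun h => (PySem.Dict.getD pvColumnBit h 0).testBit i) = (4095 : Nat).testBit i := by
      intro i
      have := congrArg (fun m => Nat.testBit m i) hm
      simpa [testBit_foldl_or] using this
    have h0 := hv 0; have h1 := hv 1; have h2 := hv 2; have h3 := hv 3
    have h4 := hv 4; have h5 := hv 5; have h6 := hv 6; have h7 := hv 7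
    have h8 := hv 8; have h9 := hv 9; have h10 := hv 10; have h11 := hv 11
    rw [key_any] at h0 h1 h2 h3 h4 h5 h6 h7 h8 h9 h10 h11
    simp only [show (4095 : Nat).testBit 0 = true by decide,
      show (4095 : Nat).testBit 1 = true by decide, show (4095 : Nat).testBit 2 = true by decide,
      show (4095 : Nat).testBit 3 = true by decide, show (4095 : Nat).testBit 4 = true by decide,
      show (4095 : Nat).testBit 5 = true by decide, show (4095 : Nat).testBit 6 = true by decide,
      show (4095 : Nat).testBit 7 = true by decide, show (4095 : Nat).testBit 8 = true by decide,
      show (4095 : Nat).testBit 9 = true by decide, show (4095 : Nat).testBit 10 = true by decide,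
      show (4095 : Nat).testBit 11 = true by decide] at h0 h1 h2 h3 h4 h5 h6 h7 h8 h9 h10 h11
    simp at h0 h1 h2 h3 h4 h5 h6 h7 h8 h9 h10 h11
    simp [h0, h1, h2, h3, h4, h5, h6, h7, h8, h9, h10, h11]
  · intro hc
    simp only [Bool.and_eq_true, Bool.or_eq_true] at hc
    obtain ⟨⟨⟨⟨⟨⟨⟨⟨⟨⟨⟨c0, c1⟩, c2⟩, c3⟩, c4⟩, c5⟩, c6⟩, c7⟩, c8⟩, c9⟩, c10⟩, c11⟩ := hc
    apply Nat.eq_of_testBit_eq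
    intro i
    rw [testBit_foldl_or]
    simp only [Nat.zero_testBit, Bool.false_or, key_any]
    by_cases hi : i < 12
    · interval_cases i <;>
        simp_all [show (4095 : Nat).testBit 0 = true by decide,
          show (4095 : Nat).testBit 1 = true by decide, show (4095 : Nat).testBit 2 = true by decide,
          show (4095 : Nat).testBit 3 = true by decide, show (4095 : Nat).testBit 4 = true by decide,
          show (4095 : Nat).testBit 5 = true by decide, show (4095 : Nat).testBit 6 = true by decide,
          show (4095 : Nat).testBit 7 = true by decide, show (4095 : Nat).testBit 8 = true by decide,
          show (4095 : Nat).testBit 9 = true by decide, show (4095 : Nat).testBit 10 = true by decide,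
          show (4095 : Nat).testBit 11 = true by decide]
    · have h4095 : (4095 : Nat).testBit i = false := by
        apply Nat.testBit_lt_two_pow
        calc (4095 : Nat) < 2 ^ 12 := by norm_num
          _ ≤ 2 ^ i := Nat.pow_le_pow_right (by norm_num) (by omega)
      have hne : ∀ j : Nat, j < 12 → ¬ (i = j) := by omega
      simp [h4095, hne 0 (by norm_num), hne 1 (by norm_num), hne 2 (by norm_num),
        hne 3 (by norm_num), hne 4 (by norm_num), hne 5 (by norm_num), hne 6 (by norm_num),
        hne 7 (by norm_num), hne 8 (by norm_num), hne 9 (by norm_num), hne 10 (by norm_num),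
        hne 11 (by norm_num)]

-- ===== VERDICT (by name: the statement is the Claim_ definition above) =====
theorem identify_serp_csv_type_spec : Claim_equal_identify_serp_csv_type := by
  intro headers _
  unfold Spec_identify_serp_csv_type
  simp only [identify_serp_csv_type, identify_serp_csv_type_alt]
  have h := mask_iff (headers.map (fun h => PySem.Str.lower (PySem.Str.strip h)))
  rw [List.foldl_map] at h
  simp only [h]
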